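-- pv_equiv track=rewrite | github.com/nacarratala/mn2024-tp1 | main/difusion/Difusion.py | generarUiCero
-- ===== SOURCE A (Python) =====
-- def generarUiCero(n, r):
--     vectorU = [0] * n
--     for i in range(n):
--         if (n // 2) - r < i < (n // 2) + r:
--             vectorU[i] = 1
--         else:
--             vectorU[i] = 0
--     return vectorU
-- ===== SOURCE B (Python) =====
-- def generarUiCero(n, r):
--     m = n // 2
--     lo = max(0, m - r + 1)
--     hi = min(n, m + r)
--     if hi <= lo:
--         return [0] * n
--     return [0] * lo + [1] * (hi - lo) + [0] * (n - hi)
-- ===== Notes on version B (the rewrite author's own statement) =====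
-- stated objective: simpler
-- what changed: Replaces the per-index conditional loop with a closed-form computation of the clamped 1-run bounds lo=max(0,n//2-r+1), hi=min(n,n//2+r) and a concatenation of three bulk-replicated blocks.
import Mathlib
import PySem

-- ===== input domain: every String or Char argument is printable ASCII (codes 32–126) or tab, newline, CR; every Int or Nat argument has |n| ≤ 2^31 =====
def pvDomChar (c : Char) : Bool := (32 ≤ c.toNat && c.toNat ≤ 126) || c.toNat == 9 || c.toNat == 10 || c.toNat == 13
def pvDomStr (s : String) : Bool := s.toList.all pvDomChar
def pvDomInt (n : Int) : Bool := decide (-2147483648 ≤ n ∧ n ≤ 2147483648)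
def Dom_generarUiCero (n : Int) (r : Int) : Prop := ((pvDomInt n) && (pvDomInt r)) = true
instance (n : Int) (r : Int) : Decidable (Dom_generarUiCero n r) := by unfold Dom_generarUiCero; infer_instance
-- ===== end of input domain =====

-- B computes the clamped bounds of the 1-run in closed form and concatenates three
-- constant blocks instead of testing every index (objective: simpler).

-- ===== PORT A =====
-- vectorU = [0]*n; for i in range(n): vectorU[i] = 1 if (n//2)-r < i < (n//2)+r else 0
def generarUiCero (n : Int) (r : Int) : List Int :=
  (PySem.List.pyRange 0 n 1).foldl
    (fun vectorU i =>
      vectorU.set i.toNat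
        (if PySem.Int.floordiv n 2 - r < i ∧ i < PySem.Int.floordiv n 2 + r then 1 else 0))
    (List.replicate n.toNat 0)

-- ===== PORT B =====
def generarUiCero_alt (n : Int) (r : Int) : List Int :=
  let m := PySem.Int.floordiv n 2
  let lo := max 0 (m - r + 1)
  let hi := min n (m + r)
  if hi ≤ lo then List.replicate n.toNat 0
  else List.replicate lo.toNat 0 ++ List.replicate (hi - lo).toNat 1 ++
       List.replicate (n - hi).toNat 0

-- ===== PRECONDITION & SPEC =====
def Spec_generarUiCero (n : Int) (r : Int) (out : List Int) : Prop := out = generarUiCero_alt n r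
instance (n : Int) (r : Int) (out : List Int) : Decidable (Spec_generarUiCero n r out) := by unfold Spec_generarUiCero; infer_instance

-- ===== CLAIM (what is proved, stated in full; the proofs are below) =====
def Claim_equal_generarUiCero : Prop := ∀ (n : Int) (r : Int), Dom_generarUiCero n r → Spec_generarUiCero n r (generarUiCero n r)

-- ===== LEMMAS AND PROOFS =====

theorem range_int_cast (n : Int) :
    PySem.List.pyRange 0 n 1 = (List.range n.toNat).map (fun k : Nat => (k : Int)) := by
  rw [PySem.List.pyRange_one]; simp

-- A's loop over range(n) setting each index once rewrites the whole vector to a map.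
theorem foldl_set_range (g : Nat → Int) (v : List Int) (m : Nat) (h : m ≤ v.length) :
    (List.range m).foldl (fun acc k => acc.set k (g k)) v
      = (List.range m).map g ++ v.drop m := by
  induction m with
  | zero => simp
  | succ m ih =>
    rw [List.range_succ, List.foldl_append, List.map_append, ih (by omega)]
    simp only [List.foldl_cons, List.foldl_nil, List.map_cons, List.map_nil]
    have hlen : ((List.range m).map g).length = m := by simp
    rw [List.set_append_right _ _ (by omega), hlen]
    have hd : v.drop m = v[m] :: v.drop (m + 1) := List.drop_eq_getElem_cons (by omega)
    rw [List.append_assoc, hd, Nat.sub_self, List.set_cons_zero]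
    rfl

theorem portA_eq_map (n r : Int) :
    generarUiCero n r
      = (List.range n.toNat).map
          (fun k : Nat => if PySem.Int.floordiv n 2 - r < (k : Int) ∧ (k : Int) < PySem.Int.floordiv n 2 + r then (1:Int) else 0) := by
  unfold generarUiCero
  rw [range_int_cast, List.foldl_map]
  simp only [Int.toNat_natCast]
  rw [foldl_set_range
    (fun k : Nat => if PySem.Int.floordiv n 2 - r < (k : Int) ∧ (k : Int) < PySem.Int.floordiv n 2 + r then (1:Int) else 0)
    (List.replicate n.toNat 0) n.toNat (by simp)]
  simp

-- the three-block concatenation is that same 0/1 map, elementwise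
theorem blocks_eq_map (N : Nat) (lo hi : Int) (h0 : 0 ≤ lo) (hlh : lo ≤ hi) (hhn : hi ≤ (N:Int)) :
    List.replicate lo.toNat (0:Int) ++ List.replicate (hi - lo).toNat 1 ++ List.replicate ((N:Int) - hi).toNat 0
      = (List.range N).map (fun k : Nat => if lo ≤ (k : Int) ∧ (k : Int) < hi then (1:Int) else 0) := by
  apply List.ext_getElem
  · simp; omega
  · intro i h1 h2
    simp only [List.getElem_map, List.getElem_range]
    simp only [List.length_map, List.length_range] at h2
    by_cases hA : i < lo.toNat
    · rw [List.getElem_append_left (by simp; omega), List.getElem_append_left (by simp; omega),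
        List.getElem_replicate]
      rw [if_neg (by omega)]
    · by_cases hB : i < lo.toNat + (hi - lo).toNat
      · rw [List.getElem_append_left (by simp; omega), List.getElem_append_right (by simp; omega)]
        simp only [List.length_replicate, List.getElem_replicate]
        rw [if_pos (by constructor <;> omega)]
      · rw [List.getElem_append_right (by simp; omega)]
        simp only [List.length_append, List.length_replicate, List.getElem_replicate]
        rw [if_neg (by omega)]

-- ===== VERDICT (by name: the statement is the Claim_ definition above) =====
theorem generarUiCero_spec : Claim_equal_generarUiCero := by
  intro n r _
  show generarUiCero n r = generarUiCero_alt n r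
  rw [portA_eq_map]
  simp only [generarUiCero_alt]
  set m := PySem.Int.floordiv n 2 with hm
  set lo := max 0 (m - r + 1) with hlo
  set hi := min n (m + r) with hhi
  have hmap : (List.range n.toNat).map
      (fun k : Nat => if m - r < (k : Int) ∧ (k : Int) < m + r then (1:Int) else 0)
      = (List.range n.toNat).map (fun k : Nat => if lo ≤ (k : Int) ∧ (k : Int) < hi then (1:Int) else 0) := by
    apply List.map_congr_left
    intro k hk
    rw [List.mem_range] at hk
    exact if_congr (by constructor <;> intro <;> constructor <;> omega) rfl rfl
  rw [hmap]
  by_cases hle : hi ≤ lo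
  · rw [if_pos hle]
    apply List.ext_getElem
    · simp
    · intro i h1 h2
      simp only [List.getElem_map, List.getElem_range, List.getElem_replicate]
      rw [if_neg (by omega)]
  · rw [if_neg hle]
    have hnn : ((n.toNat : Int)) = n := by omega
    rw [show n - hi = (n.toNat : Int) - hi by omega]
    exact (blocks_eq_map n.toNat lo hi (by omega) (by omega) (by omega)).symm
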